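-- pv_equiv track=rewrite | github.com/alekseykrazhev/cryptography | lab3/BM.py | BM
-- ===== SOURCE A (Python) =====
-- def BM(x):
--     # x: input sequence
--     # return: (r, c, d)
--     # r: remainder sequence
--     # c: correction sequence
--     # d: degree of correction sequence
--     n = len(x)
--     r = [0] * n
--     c = [0] * n
--     d = 0
--     for i in range(n):
--         r[i] = x[i]
--         for j in range(i):
--             if r[j] == r[i]:
--                 c[i] = 1
--                 break
--         if c[i] == 0:
--             d = i
--     return r, c, d
-- ===== SOURCE B (Python) =====
-- def BM(x):
--     # Single pass builds a first-occurrence index; duplicates and the degree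
--     # are then read off directly instead of A's quadratic rescans.
--     first = {}
--     for i, v in enumerate(x):
--         if v not in first:
--             first[v] = i
--     c = [0 if first[v] == i else 1 for i, v in enumerate(x)]
--     d = max(first.values(), default=0)
--     return list(x), c, d
-- ===== Notes on version B (the rewrite author's own statement) =====
-- stated objective: faster
-- what changed: Replaces A's quadratic inner rescan per element with one dict pass recording each value's first index; duplicate flags and the degree (max first-occurrence index) are read off that dict.
import Mathlib
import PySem

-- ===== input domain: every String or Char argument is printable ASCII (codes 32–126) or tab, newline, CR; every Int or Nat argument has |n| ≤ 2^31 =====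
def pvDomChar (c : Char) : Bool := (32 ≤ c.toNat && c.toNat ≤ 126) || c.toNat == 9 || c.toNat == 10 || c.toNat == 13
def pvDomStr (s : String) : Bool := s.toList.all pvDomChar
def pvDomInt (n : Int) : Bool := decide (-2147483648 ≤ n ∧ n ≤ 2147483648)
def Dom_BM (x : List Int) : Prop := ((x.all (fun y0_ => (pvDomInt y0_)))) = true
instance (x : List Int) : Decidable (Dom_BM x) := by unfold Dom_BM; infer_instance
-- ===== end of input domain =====

-- B replaces A's quadratic per-element rescan with one first-occurrence dict pass (objective: faster).

-- ===== PORT A =====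
-- inner loop 'for j in range(i): if r[j] == r[i]: c[i] = 1; break'
def BMinner (r : List Int) (c : List Int) (i : Int) : List Int → List Int
  | [] => c
  | j :: js =>
      if PySem.List.pyGetD r j 0 = PySem.List.pyGetD r i 0 then
        PySem.List.pySetD c i 1
      else BMinner r c i js

-- body of 'for i in range(n)': state (r, c, d)
def BMstep (x : List Int) (s : List Int × List Int × Int) (i : Int) : List Int × List Int × Int :=
  let r := PySem.List.pySetD s.1 i (PySem.List.pyGetD x i 0)
  let c := BMinner r s.2.1 i (PySem.List.pyRange 0 i 1)
  let d := if PySem.List.pyGetD c i 0 = 0 then i else s.2.2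
  (r, c, d)

def BM (x : List Int) : List Int × List Int × Int :=
  (PySem.List.pyRange 0 (x.length : Int) 1).foldl (BMstep x)
    (List.replicate x.length 0, List.replicate x.length 0, 0)

-- ===== PORT B =====
-- 'first = {}; for i, v in enumerate(x): if v not in first: first[v] = i'
def BMfirst (x : List Int) : PySem.Dict Int Int :=
  (PySem.List.enumerate x 0).foldl
    (fun d p => if d.contains p.2 then d else d.insert p.2 p.1) PySem.Dict.empty

def BM_alt (x : List Int) : List Int × List Int × Int :=
  let first := BMfirst x
  let c := (PySem.List.enumerate x 0).map
    (fun p => if first.getD p.2 0 = p.1 then (0 : Int) else 1)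
  let d := PySem.List.maxD first.values (fun v => v) 0
  (x, c, d)

-- ===== PRECONDITION & SPEC =====
def Spec_BM (x : List Int) (out : List Int × List Int × Int) : Prop := out = BM_alt x
instance (x : List Int) (out : List Int × List Int × Int) : Decidable (Spec_BM x out) := by unfold Spec_BM; infer_instance

-- ===== CLAIM (what is proved, stated in full; the proofs are below) =====
def Claim_equal_BM : Prop := ∀ (x : List Int), Dom_BM x → Spec_BM x (BM x)

-- ===== LEMMAS AND PROOFS =====

-- duplicate flags of A and B alike: 1 iff the element occurred before (seen = earlier elements)
def cGo (seen : List Int) : List Int → List Int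
  | [] => []
  | v :: vs => (if v ∈ seen then (1 : Int) else 0) :: cGo (seen ++ [v]) vs

-- indices of first occurrences, in increasing order, starting at index s
def foGo (seen : List Int) (s : Int) : List Int → List Int
  | [] => []
  | v :: vs => if v ∈ seen then foGo seen (s + 1) vs else s :: foGo (seen ++ [v]) (s + 1) vs

theorem getD_append_len (l1 l2 : List Int) (d : Int) :
    (l1 ++ l2).getD l1.length d = l2.getD 0 d := by
  rcases l2 with _ | ⟨a, t⟩
  · simp [List.getD]
  · have h : l1.length < (l1 ++ a :: t).length := by simp
    rw [List.getD_eq_getElem _ _ h]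
    simp

theorem length_cGo (xs : List Int) : ∀ seen, (cGo seen xs).length = xs.length := by
  induction xs with
  | nil => intro seen; rfl
  | cons v vs ih => intro seen; simp [cGo, ih]

theorem cGo_snoc (x : List Int) (seen : List Int) (v : Int) :
    cGo seen (x ++ [v]) = cGo seen x ++ [if v ∈ seen ++ x then (1 : Int) else 0] := by
  induction x generalizing seen with
  | nil => simp [cGo]
  | cons h t ih => simp [cGo, ih (seen ++ [h]), List.append_assoc, List.mem_append]

theorem foGo_snoc (x : List Int) (seen : List Int) (s : Int) (v : Int) :
    foGo seen s (x ++ [v]) =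
      foGo seen s x ++ (if v ∈ seen ++ x then [] else [s + x.length]) := by
  induction x generalizing seen s with
  | nil => simp [foGo]
  | cons h t ih =>
      by_cases hm : h ∈ seen
      · simp only [List.cons_append, foGo, hm, if_true, ih seen (s + 1)]
        have h1 : (v ∈ seen ++ h :: t) ↔ (v ∈ seen ++ t) := by
          simp only [List.mem_append, List.mem_cons]
          constructor
          · rintro (a | a | a)
            exacts [Or.inl a, Or.inl (a ▸ hm), Or.inr a]
          · rintro (a | a)
            exacts [Or.inl a, Or.inr (Or.inr a)]
        by_cases hv : v ∈ seen ++ h :: t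
        · simp [hv, h1.mp hv]
        · have hv' : v ∉ seen ++ t := fun a => hv (h1.mpr a)
          simp [hv, hv']
          omega
      · simp only [List.cons_append, foGo, hm, if_false, ih (seen ++ [h]) (s + 1)]
        by_cases hv : v ∈ seen ++ h :: t
        · simp [hv]
        · have hv' : v ∉ (seen ++ [h]) ++ t := by
            simpa [List.append_assoc] using hv
          simp [hv]
          omega


theorem foGo_lb (xs : List Int) : ∀ (seen : List Int) (s y : Int),
    y ∈ foGo seen s xs → s ≤ y := by
  induction xs with
  | nil => intro seen s y h; simp [foGo] at h
  | cons v vs ih =>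
      intro seen s y h
      by_cases hm : v ∈ seen
      · simp only [foGo, hm, if_true] at h
        have := ih seen (s + 1) y h
        omega
      · simp only [foGo, hm, if_false, List.mem_cons] at h
        rcases h with h | h
        · omega
        · have := ih (seen ++ [v]) (s + 1) y h
          omega

theorem foGo_pairwise (xs : List Int) : ∀ (seen : List Int) (s : Int),
    (foGo seen s xs).Pairwise (· < ·) := by
  induction xs with
  | nil => intro seen s; simp [foGo]
  | cons v vs ih =>
      intro seen s
      by_cases hm : v ∈ seen
      · simpa [foGo, hm] using ih seen (s + 1)
      · simp only [foGo, hm, if_false, List.pairwise_cons]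
        refine ⟨fun y hy => ?_, ih (seen ++ [v]) (s + 1)⟩
        have := foGo_lb vs (seen ++ [v]) (s + 1) y hy
        omega

theorem le_getLast_of_pairwise (l : List Int) (hl : l.Pairwise (· < ·)) (h : l ≠ []) :
    ∀ y ∈ l, y ≤ l.getLast h := by
  induction l with
  | nil => simp at h
  | cons a t ih =>
      intro y hy
      rcases List.mem_cons.mp hy with rfl | hy
      · cases t with
        | nil => simp
        | cons b u =>
            have hab : y < b := (List.pairwise_cons.mp hl).1 b (by simp)
            have := ih (List.pairwise_cons.mp hl).2 (by simp) b (by simp)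
            rw [List.getLast_cons (by simp)]
            omega
      · cases t with
        | nil => simp at hy
        | cons b u =>
            have := ih (List.pairwise_cons.mp hl).2 (by simp) y hy
            rw [List.getLast_cons (by simp)]
            exact this

theorem maxD_eq_getLastD (l : List Int) (hl : l.Pairwise (· < ·)) :
    PySem.List.maxD l (fun v => v) 0 = l.getLastD 0 := by
  cases l with
  | nil => rfl
  | cons a t =>
      have hne : a :: t ≠ [] := by simp
      rcases hm : PySem.List.max? (a :: t) (fun v => v) with _ | m
      · simp [PySem.List.max?_eq_none_iff] at hm
      · have hmem : m ∈ a :: t := PySem.List.max?_mem hm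
        have hmax : ∀ y ∈ a :: t, y ≤ m := PySem.List.max?_isMax hm
        have h2 : (a :: t).getLast hne ≤ m :=
          hmax _ (List.getLast_mem hne)
        have h1 : m ≤ (a :: t).getLast hne :=
          le_getLast_of_pairwise _ hl hne m hmem
        have : m = (a :: t).getLast hne := le_antisymm h1 h2
        rw [PySem.List.maxD, hm, Option.getD_some, this, List.getLastD_eq_getLast?,
          List.getLast?_eq_some_getLast hne, Option.getD_some]

theorem length_BMinner (r c : List Int) (i : Int) (js : List Int) :
    (BMinner r c i js).length = c.length := by
  induction js with
  | nil => rfl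
  | cons j js ih =>
      simp only [BMinner]
      split
      · simp [PySem.List.length_pySetD]
      · exact ih


theorem BMinner_pad (r c : List Int) (a b i : Int)
    (hi0 : 0 ≤ i) (hir : i < (r.length : Int)) (hic : i.toNat < c.length) :
    ∀ js : List Int, (∀ j ∈ js, 0 ≤ j ∧ j < (r.length : Int)) →
    BMinner (r ++ [a]) (c ++ [b]) i js = BMinner r c i js ++ [b] := by
  intro js hjs
  induction js with
  | nil => simp [BMinner]
  | cons j js ih =>
      obtain ⟨hj0, hjr⟩ := hjs j (by simp)
      have hrest : ∀ j ∈ js, 0 ≤ j ∧ j < (r.length : Int) :=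
        fun j h => hjs j (List.mem_cons_of_mem _ h)
      have hj : j = (j.toNat : Int) := (Int.toNat_of_nonneg hj0).symm
      have hii : i = (i.toNat : Int) := (Int.toNat_of_nonneg hi0).symm
      have hjlt : j.toNat < r.length := by omega
      have hilt : i.toNat < r.length := by omega
      simp only [BMinner]
      rw [hj, hii, PySem.List.pyGetD_natCast, PySem.List.pyGetD_natCast,
        PySem.List.pyGetD_natCast, PySem.List.pyGetD_natCast,
        List.getD_append _ _ _ _ hjlt, List.getD_append _ _ _ _ hilt]
      split
      · rw [← hii, PySem.List.pySetD_of_nonneg (c ++ [b]) 1 hi0, PySem.List.pySetD_of_nonneg c 1 hi0,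
          List.set_append_left _ _ hic]
      · rw [← hii]
        exact ih hrest

theorem BMstep_pad (x : List Int) (v a b : Int) :
    ∀ l : List Int, (∀ i ∈ l, 0 ≤ i ∧ i < (x.length : Int)) →
    ∀ (r c : List Int) (d : Int), r.length = x.length → c.length = x.length →
    l.foldl (BMstep (x ++ [v])) (r ++ [a], c ++ [b], d)
      = ((l.foldl (BMstep x) (r, c, d)).1 ++ [a],
         (l.foldl (BMstep x) (r, c, d)).2.1 ++ [b],
         (l.foldl (BMstep x) (r, c, d)).2.2) := by
  intro l
  induction l with
  | nil => intro _ r c d _ _; rfl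
  | cons i l ih =>
      intro hl r c d hr hc
      obtain ⟨hi0, hilt⟩ := hl i (by simp)
      have hrest : ∀ i ∈ l, 0 ≤ i ∧ i < (x.length : Int) :=
        fun i h => hl i (List.mem_cons_of_mem _ h)
      have hii : i = (i.toNat : Int) := (Int.toNat_of_nonneg hi0).symm
      have hixlt : i.toNat < x.length := by omega
      rw [List.foldl_cons, List.foldl_cons]
      have hread : PySem.List.pyGetD (x ++ [v]) i 0 = PySem.List.pyGetD x i 0 := by
        rw [hii, PySem.List.pyGetD_natCast, PySem.List.pyGetD_natCast,
          List.getD_append _ _ _ _ hixlt]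
      have hsetr : PySem.List.pySetD (r ++ [a]) i (PySem.List.pyGetD x i 0)
          = PySem.List.pySetD r i (PySem.List.pyGetD x i 0) ++ [a] := by
        rw [PySem.List.pySetD_of_nonneg _ _ hi0, PySem.List.pySetD_of_nonneg _ _ hi0,
          List.set_append_left _ _ (by omega)]
      have hstep : BMstep (x ++ [v]) (r ++ [a], c ++ [b], d) i
          = ((BMstep x (r, c, d) i).1 ++ [a], (BMstep x (r, c, d) i).2.1 ++ [b],
             (BMstep x (r, c, d) i).2.2) := by
        simp only [BMstep, hread, hsetr]
        have hrlen : (PySem.List.pySetD r i (PySem.List.pyGetD x i 0)).length = r.length :=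
          PySem.List.length_pySetD r i _
        have hinner := BMinner_pad (PySem.List.pySetD r i (PySem.List.pyGetD x i 0)) c a b i
          hi0 (by omega) (by omega) (PySem.List.pyRange 0 i)
          (by intro j hj
              obtain ⟨h1, h2⟩ := PySem.List.mem_pyRange_one.mp hj
              constructor
              · exact h1
              · omega)
        rw [hinner]
        have hclen : (BMinner (PySem.List.pySetD r i (PySem.List.pyGetD x i 0)) c i
            (PySem.List.pyRange 0 i)).length = c.length := length_BMinner _ _ _ _
        have hcread : ∀ cc : List Int, cc.length = c.length →
            PySem.List.pyGetD (cc ++ [b]) i 0 = PySem.List.pyGetD cc i 0 := by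
          intro cc hcc
          rw [hii, PySem.List.pyGetD_natCast, PySem.List.pyGetD_natCast,
            List.getD_append _ _ _ _ (by omega)]
        rw [hcread _ hclen]
      rw [hstep]
      rw [ih hrest _ _ _ (by simp [BMstep, PySem.List.length_pySetD, hr])
            (by simp [BMstep, length_BMinner, hc])]

theorem BMinner_char (x : List Int) (v : Int) :
    ∀ (k : Nat) (c : List Int) (a : Nat), a + k = x.length →
    BMinner (x ++ [v]) c (x.length : Int) (PySem.List.pyRange (a : Int) (x.length : Int))
      = if v ∈ x.drop a then PySem.List.pySetD c (x.length : Int) 1 else c := by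
  intro k
  induction k with
  | zero =>
      intro c a ha
      have : a = x.length := by omega
      subst this
      rw [PySem.List.pyRange_one_eq_nil le_rfl, List.drop_length]
      simp [BMinner]
  | succ k ih =>
      intro c a ha
      have halt : a < x.length := by omega
      rw [PySem.List.pyRange_one_cons (by exact_mod_cast halt)]
      have hgv : PySem.List.pyGetD (x ++ [v]) (x.length : Int) 0 = v := by
        rw [PySem.List.pyGetD_natCast, getD_append_len]
        rfl
      have hga : PySem.List.pyGetD (x ++ [v]) (a : Int) 0 = x[a] := by
        rw [PySem.List.pyGetD_natCast, List.getD_append _ _ _ _ halt,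
          List.getD_eq_getElem _ _ halt]
      have hdrop : x.drop a = x[a] :: x.drop (a + 1) := List.drop_eq_getElem_cons halt
      simp only [BMinner, hgv, hga]
      by_cases hv : x[a] = v
      · simp only [hv, if_true]
        have hmem : v ∈ x.drop a := by
          rw [hdrop, hv]
          exact List.mem_cons_self
        simp [hmem]
      · simp only [hv, if_false]
        have hcast : ((a : Int) + 1) = ((a + 1 : Nat) : Int) := by push_cast; ring
        rw [hcast, ih c (a + 1) (by omega)]
        have hiff : (v ∈ x.drop a) ↔ (v ∈ x.drop (a + 1)) := by
          rw [hdrop]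
          simp only [List.mem_cons]
          exact or_iff_right (fun h => hv h.symm)
        by_cases hm : v ∈ x.drop (a + 1)
        · simp [hm, hiff.mpr hm]
        · have hm2 : v ∉ x.drop a := fun h => hm (hiff.mp h)
          simp [hm, hm2]


theorem BM_char (x : List Int) :
    BM x = (x, cGo [] x, (foGo [] 0 x).getLastD 0) := by
  induction x using List.reverseRecOn with
  | nil => rfl
  | append_singleton x v ih =>
      have hlen : (x ++ [v]).length = x.length + 1 := by simp
      have hrange : PySem.List.pyRange 0 ((x.length : Int) + 1)
          = PySem.List.pyRange 0 (x.length : Int) ++ [(x.length : Int)] :=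
        PySem.List.pyRange_one_succ_right (by positivity)
      have hrep : List.replicate (x.length + 1) (0 : Int)
          = List.replicate x.length 0 ++ [0] := by
        rw [List.replicate_succ']
      have hpad := BMstep_pad x v 0 0 (PySem.List.pyRange 0 (x.length : Int))
        (by intro i hi
            obtain ⟨h1, h2⟩ := PySem.List.mem_pyRange_one.mp hi
            exact ⟨h1, h2⟩)
        (List.replicate x.length 0) (List.replicate x.length 0) 0
        (by simp) (by simp)
      have hBMx : (PySem.List.pyRange 0 (x.length : Int)).foldl (BMstep x)
          (List.replicate x.length 0, List.replicate x.length 0, 0)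
          = (x, cGo [] x, (foGo [] 0 x).getLastD 0) := ih
      rw [BM, hlen]
      push_cast
      rw [hrange, hrep, List.foldl_append, List.foldl_cons, List.foldl_nil, hpad, hBMx]
      -- the last iteration, at index x.length
      have hgv : PySem.List.pyGetD (x ++ [v]) (x.length : Int) 0 = v := by
        rw [PySem.List.pyGetD_natCast, getD_append_len]
        rfl
      have hsetr : PySem.List.pySetD (x ++ [0]) (x.length : Int) v = x ++ [v] := by
        rw [PySem.List.pySetD_of_nonneg _ _ (by positivity), Int.toNat_natCast]
        rw [List.set_append_right _ _ (le_refl _)]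
        simp
      have hinner := BMinner_char x v x.length (cGo [] x ++ [0]) 0 (by omega)
      simp only [Nat.cast_zero, List.drop_zero] at hinner
      have hsetc : PySem.List.pySetD (cGo [] x ++ [0]) (x.length : Int) 1
          = cGo [] x ++ [1] := by
        rw [PySem.List.pySetD_of_nonneg _ _ (by positivity), Int.toNat_natCast]
        rw [List.set_append_right _ _ (by rw [length_cGo])]
        simp [length_cGo]
      have hflag : ∀ f : Int, PySem.List.pyGetD (cGo [] x ++ [f]) (x.length : Int) 0 = f := by
        intro f
        have h := getD_append_len (cGo [] x) [f] 0
        rw [length_cGo] at h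
        rw [PySem.List.pyGetD_natCast, h]
        rfl
      simp only [BMstep, hgv, hsetr, hinner, hsetc]
      by_cases hm : v ∈ x
      · simp only [hm, if_true, hflag]
        rw [cGo_snoc, foGo_snoc]
        simp [hm]
      · simp only [hm, if_false, hflag]
        rw [cGo_snoc, foGo_snoc]
        simp [hm]

theorem first_get? (v : Int) :
    ∀ (xs : List Int) (s : Int) (d : PySem.Dict Int Int),
    ((PySem.List.enumerate xs s).foldl
        (fun d p => if d.contains p.2 then d else d.insert p.2 p.1) d).get? v
      = if d.contains v then d.get? v
        else (PySem.List.index? xs v).map (fun k => s + Int.ofNat k) := by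
  intro xs
  induction xs with
  | nil =>
      intro s d
      rw [PySem.List.enumerate_nil, List.foldl_nil]
      by_cases hv : d.contains v
      · simp [hv]
      · simp only [hv, Bool.false_eq_true, if_false, PySem.List.index?_eq_idxOf?,
          List.idxOf?_nil]
        exact (PySem.Dict.get?_eq_none_iff_contains d v).mpr (by simpa using hv)
  | cons u us ih =>
      intro s d
      rw [PySem.List.enumerate_cons, List.foldl_cons]
      by_cases huv : u = v
      · subst huv
        by_cases hc : d.contains u
        · simp only [hc, if_true]
          rw [ih (s + 1) d]
          simp [hc]
        · simp only [hc, Bool.false_eq_true, if_false]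
          rw [ih (s + 1) (d.insert u s)]
          rw [PySem.List.index?_cons_self]
          simp [PySem.Dict.contains_insert_self, PySem.Dict.get?_insert_self]
      · have hrw : PySem.List.index? (u :: us) v
            = (PySem.List.index? us v).map (· + 1) :=
          PySem.List.index?_cons_of_ne us huv
        by_cases hc : d.contains u
        · simp only [hc, if_true]
          rw [ih (s + 1) d, hrw]
          by_cases hv : d.contains v
          · simp [hv]
          · cases PySem.List.index? us v
            · simp [hv]
            · simp [hv]
              ring
        · simp only [hc, Bool.false_eq_true, if_false]
          rw [ih (s + 1) (d.insert u s), hrw]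
          have h1 : (d.insert u s).contains v = d.contains v := by
            rw [PySem.Dict.contains_insert]
            simp [Ne.symm huv]
          rw [h1]
          by_cases hv : d.contains v
          · simp [hv, PySem.Dict.get?_insert_of_ne _ _ (Ne.symm huv)]
          · cases PySem.List.index? us v
            · simp [hv]
            · simp [hv]
              ring

theorem first_getD (x : List Int) (v : Int) :
    (BMfirst x).getD v 0 = ((PySem.List.index? x v).map (fun k => Int.ofNat k)).getD 0 := by
  rw [PySem.Dict.getD_eq_get?_getD, BMfirst, first_get? v x 0 PySem.Dict.empty]
  simp [PySem.Dict.contains_empty]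

theorem Bc (x : List Int) : ∀ (xs pre : List Int), x = pre ++ xs →
    (PySem.List.enumerate xs (pre.length : Int)).map
      (fun p => if (BMfirst x).getD p.2 0 = p.1 then (0 : Int) else 1) = cGo pre xs := by
  intro xs
  induction xs with
  | nil => intro pre _; simp [PySem.List.enumerate_nil, cGo]
  | cons v vs ih =>
      intro pre hx
      rw [PySem.List.enumerate_cons, List.map_cons, cGo]
      have htail := ih (pre ++ [v]) (by rw [hx]; simp)
      have hlen : ((pre ++ [v]).length : Int) = (pre.length : Int) + 1 := by
        simp
      rw [hlen] at htail
      rw [htail]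
      congr 1
      have hD := first_getD x v
      by_cases hm : v ∈ pre
      · obtain ⟨k, hk⟩ := (PySem.List.index?_isSome_iff pre v).mpr hm |> Option.isSome_iff_exists.mp
        obtain ⟨hklt, -, -⟩ := PySem.List.getElem_of_index?_eq_some hk
        have hidx : PySem.List.index? x v = some k := by
          rw [hx, PySem.List.index?_append_of_mem (v :: vs) hm, hk]
        simp only [hidx, Option.map_some, Option.getD_some] at hD
        have hne : (BMfirst x).getD v 0 ≠ (pre.length : Int) := by
          rw [hD]; simp only [Int.ofNat_eq_natCast]; exact_mod_cast Nat.ne_of_lt hklt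
        simp [hne, hm]
      · have hidx : PySem.List.index? x v = some pre.length := by
          rw [PySem.List.index?_eq_some_iff]
          exact ⟨pre, vs, hx, rfl, hm⟩
        simp only [hidx, Option.map_some, Option.getD_some] at hD
        simp [hD, hm]

theorem first_values :
    ∀ (xs : List Int) (s : Int) (d : PySem.Dict Int Int), d.keys.Nodup →
    ((PySem.List.enumerate xs s).foldl
        (fun d p => if d.contains p.2 then d else d.insert p.2 p.1) d).values
      = d.values ++ foGo d.keys s xs := by
  intro xs
  induction xs with
  | nil => intro s d _; simp [PySem.List.enumerate_nil, foGo]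
  | cons v vs ih =>
      intro s d hnd
      rw [PySem.List.enumerate_cons, List.foldl_cons]
      by_cases hc : d.contains v
      · have hm : v ∈ d.keys := (PySem.Dict.contains_iff_mem_keys d v).mp hc
        simp only [hc, if_true]
        rw [ih (s + 1) d hnd]
        simp [foGo, hm]
      · have hm : v ∉ d.keys := fun h => by
          simp [(PySem.Dict.contains_iff_mem_keys d v).mpr h] at hc
        simp only [hc, Bool.false_eq_true, if_false]
        have hitems := PySem.Dict.items_insert_of_not_contains d s (by simpa using hc)
        have hkeys : (d.insert v s).keys = d.keys ++ [v] := by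
          simp [PySem.Dict.keys, hitems]
        have hvals : (d.insert v s).values = d.values ++ [s] := by
          simp [PySem.Dict.values, hitems]
        rw [ih (s + 1) (d.insert v s) (PySem.Dict.nodup_keys_insert d v s hnd)]
        rw [hkeys, hvals]
        simp [foGo, hm]


theorem BM_alt_char (x : List Int) :
    BM_alt x = (x, cGo [] x, (foGo [] 0 x).getLastD 0) := by
  have hc := Bc x x [] rfl
  simp only [List.length_nil, Nat.cast_zero] at hc
  have hv := first_values x 0 PySem.Dict.empty (by simp [PySem.Dict.keys_empty])
  have hd : (BMfirst x).values = foGo [] 0 x := by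
    rw [BMfirst, hv]
    simp [PySem.Dict.keys_empty]
    rfl
  simp only [BM_alt]
  rw [hc, hd, maxD_eq_getLastD _ (foGo_pairwise x [] 0)]

-- ===== VERDICT (by name: the statement is the Claim_ definition above) =====
theorem BM_spec : Claim_equal_BM := by
  intro x _
  unfold Spec_BM
  rw [BM_char, BM_alt_char]
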